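-- pv_equiv track=rewrite | github.com/AdamZhouSE/pythonHomework | Code/CodeRecords/2373/48117/269117.py | calcMaxProfit
-- ===== SOURCE A (Python) =====
-- def calcMaxProfit(s : list) -> int:
--     if len(s) == 1:
--         return s[0]
--     else:
--         maxIndex = s.index(max(s))
--         if maxIndex <= 1:
--             if maxIndex + 2 >= len(s):
--                 return s[maxIndex]
--             else:
--                 return s[maxIndex] + calcMaxProfit(s[maxIndex + 2:])
--         elif maxIndex >= len(s) - 2:
--             if maxIndex - 2 < 0:
--                 return s[maxIndex]
--             else:
--                 return s[maxIndex] + calcMaxProfit(s[:maxIndex - 1])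
--         else:
--             return s[maxIndex] + calcMaxProfit(s[maxIndex + 2:]) + calcMaxProfit(s[:maxIndex - 1])
-- ===== SOURCE B (Python) =====
-- def calcMaxProfit(s: list) -> int:
--     # Iterative sort-and-mark: process indices by descending value (ties by
--     # original position); each unremoved index is selected and knocks out its
--     # neighbours.  O(n log n) instead of A's recursive slice-and-rescan.
--     n = len(s)
--     order = sorted(range(n), key=lambda i: (-s[i], i))
--     removed = [False] * n
--     total = 0
--     for i in order:
--         if not removed[i]:
--             total += s[i]
--             removed[i] = True
--             if i > 0:
--                 removed[i - 1] = True
--             if i + 1 < n: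
--                 removed[i + 1] = True
--     return total
-- ===== Notes on version B (the rewrite author's own statement) =====
-- stated objective: faster
-- what changed: Replaces A's recursive greedy (rescan each sublist for its max, slice, recurse) by a non-recursive sort-and-mark pass: indices sorted once by (descending value, position), then each still-unremoved index is taken and its neighbours marked removed.
import Mathlib
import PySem

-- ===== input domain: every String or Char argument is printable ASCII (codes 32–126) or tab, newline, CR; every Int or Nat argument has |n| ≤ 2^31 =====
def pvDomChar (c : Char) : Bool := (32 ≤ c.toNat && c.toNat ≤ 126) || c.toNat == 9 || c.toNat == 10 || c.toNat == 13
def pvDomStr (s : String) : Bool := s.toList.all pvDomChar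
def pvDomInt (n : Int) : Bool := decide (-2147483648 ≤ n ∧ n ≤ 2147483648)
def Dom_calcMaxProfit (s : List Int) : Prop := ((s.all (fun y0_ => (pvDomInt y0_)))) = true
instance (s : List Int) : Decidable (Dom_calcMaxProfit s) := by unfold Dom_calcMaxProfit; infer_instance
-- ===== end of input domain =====

-- B replaces A's recursive slice-and-rescan greedy by an iterative sort-and-mark pass:
-- indices sorted by (descending value, position), each unremoved index is taken and its
-- neighbours marked removed (objective: faster, O(n log n) sort vs A's quadratic rescans).


-- ===== PORT A =====
-- literal transliteration of A; where Python raises (empty s) the match falls to 0, excluded by Pre_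
def calcMaxProfit (s : List Int) : Int :=
  if (s.length : Int) = 1 then PySem.List.pyGetD s 0 0
  else
    match hmx : PySem.List.max? s (fun y => y) with
    | none => 0    -- max([]) raises ValueError: outside Pre_
    | some mx =>
      match hmi : PySem.List.index? s mx with
      | none => 0  -- unreachable: mx ∈ s
      | some mi =>
        if (mi : Int) ≤ 1 then
          if (mi : Int) + 2 ≥ (s.length : Int) then PySem.List.pyGetD s mi 0
          else PySem.List.pyGetD s mi 0
               + calcMaxProfit (PySem.List.slice s (some ((mi : Int) + 2)) none)
        else if (mi : Int) ≥ (s.length : Int) - 2 then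
          if (mi : Int) - 2 < 0 then PySem.List.pyGetD s mi 0
          else PySem.List.pyGetD s mi 0
               + calcMaxProfit (PySem.List.slice s none (some ((mi : Int) - 1)))
        else PySem.List.pyGetD s mi 0
             + calcMaxProfit (PySem.List.slice s (some ((mi : Int) + 2)) none)
             + calcMaxProfit (PySem.List.slice s none (some ((mi : Int) - 1)))
  termination_by s.length
  decreasing_by
  · have hm := PySem.List.getElem_of_index?_eq_some hmi
    obtain ⟨hk, -, -⟩ := hm
    have : PySem.List.slice s (some ((mi : Int) + 2)) none = s.drop (mi + 2) := by
      have : ((mi : Int) + 2) = ((mi + 2 : Nat) : Int) := by push_cast; ring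
      rw [this, PySem.List.slice_from_natCast]
    rw [this]; simp [List.length_drop]; omega
  · have hm := PySem.List.getElem_of_index?_eq_some hmi
    obtain ⟨hk, -, -⟩ := hm
    have h2 : ¬ (mi : Int) ≤ 1 := by assumption
    have : PySem.List.slice s none (some ((mi : Int) - 1)) = s.take (mi - 1) := by
      have : ((mi : Int) - 1) = ((mi - 1 : Nat) : Int) := by omega
      rw [this, PySem.List.slice_to_natCast]
    rw [this]; simp [List.length_take]; omega
  · have hm := PySem.List.getElem_of_index?_eq_some hmi
    obtain ⟨hk, -, -⟩ := hm
    have : PySem.List.slice s (some ((mi : Int) + 2)) none = s.drop (mi + 2) := by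
      have : ((mi : Int) + 2) = ((mi + 2 : Nat) : Int) := by push_cast; ring
      rw [this, PySem.List.slice_from_natCast]
    rw [this]; simp [List.length_drop]; omega
  · have hm := PySem.List.getElem_of_index?_eq_some hmi
    obtain ⟨hk, -, -⟩ := hm
    have h2 : ¬ (mi : Int) ≤ 1 := by assumption
    have : PySem.List.slice s none (some ((mi : Int) - 1)) = s.take (mi - 1) := by
      have : ((mi : Int) - 1) = ((mi - 1 : Nat) : Int) := by omega
      rw [this, PySem.List.slice_to_natCast]
    rw [this]; simp [List.length_take]; omega

-- ===== PORT B =====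
-- body of Source B's for-loop: state = (removed list, running total)
def pvStep (s : List Int) (st : List Bool × Int) (i : Int) : List Bool × Int :=
  if PySem.List.pyGetD st.1 i false then st
  else
    let total := st.2 + PySem.List.pyGetD s i 0
    let removed := st.1.set i.toNat true
    let removed := if 0 < i then removed.set (i - 1).toNat true else removed
    let removed := if i + 1 < (s.length : Int) then removed.set (i + 1).toNat true else removed
    (removed, total)

def calcMaxProfit_alt (s : List Int) : Int :=
  ((PySem.List.sorted2 (PySem.List.pyRange 0 (s.length : Int))
      (fun i => -(PySem.List.pyGetD s i 0)) (fun i => i)).foldl (pvStep s)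
    (List.replicate s.length false, 0)).2

-- ===== PRECONDITION & SPEC =====
-- Pre_ excludes only the empty list, on which A raises ValueError (max of empty sequence).
def Pre_calcMaxProfit (s : List Int) : Prop := s ≠ []
instance (s : List Int) : Decidable (Pre_calcMaxProfit s) := by unfold Pre_calcMaxProfit; infer_instance
def pvWitness_calcMaxProfit : List Int := ([1, 5, 2])
def Spec_calcMaxProfit (s : List Int) (out : Int) : Prop := out = calcMaxProfit_alt s
instance (s : List Int) (out : Int) : Decidable (Spec_calcMaxProfit s out) := by unfold Spec_calcMaxProfit; infer_instance

-- ===== CLAIM (what is proved, stated in full; the proofs are below) =====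
def Claim_equal_calcMaxProfit : Prop := ∀ (s : List Int), Dom_calcMaxProfit s → Pre_calcMaxProfit s → Spec_calcMaxProfit s (calcMaxProfit s)

-- ===== LEMMAS AND PROOFS =====

-- fold results of an argmax-style loop stay in {b} ∪ range
theorem pvFoldChoiceMem (l : List Int) (b : Int) (g : Int → Int → Bool) :
    l.foldl (fun b i => if g b i then i else b) b ∈ b :: l := by
  induction l generalizing b with
  | nil => simp [List.foldl]
  | cons x xs ih =>
    simp only [List.foldl]
    rcases List.mem_cons.mp (ih (if g b x then x else b)) with h | h
    · rw [h]; by_cases hg : g b x = true <;> simp [hg]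
    · simp [h]

-- index-range form of A's greedy (proof-layer bridge between the two ports)
def pvGo (s : List Int) (lo hi : Int) : Int :=
  let bi := (PySem.List.pyRange (lo + 1) hi 1).foldl
      (fun bi i => if PySem.List.pyGetD s i 0 > PySem.List.pyGetD s bi 0 then i else bi) lo
  let total := PySem.List.pyGetD s bi 0
  let total := if h1 : bi + 2 < hi then total + pvGo s (bi + 2) hi else total
  if h2 : bi - 1 > lo then total + pvGo s lo (bi - 1) else total
  termination_by (hi - lo).toNat
  decreasing_by
  · have hb := pvFoldChoiceMem (PySem.List.pyRange (lo + 1) hi 1) lo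
      (fun bi i => decide (PySem.List.pyGetD s i 0 > PySem.List.pyGetD s bi 0))
    rcases (by simpa using hb : bi = lo ∨ bi ∈ PySem.List.pyRange (lo + 1) hi 1) with h | h
    · omega
    · rw [PySem.List.mem_pyRange_one] at h; omega
  · have hb := pvFoldChoiceMem (PySem.List.pyRange (lo + 1) hi 1) lo
      (fun bi i => decide (PySem.List.pyGetD s i 0 > PySem.List.pyGetD s bi 0))
    rcases (by simpa using hb : bi = lo ∨ bi ∈ PySem.List.pyRange (lo + 1) hi 1) with h | h
    · omega
    · rw [PySem.List.mem_pyRange_one] at h; omega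

-- A's argmax scan over [lo, hi) computes lo + (index of the first maximum of the slice)
theorem pvArgmaxSpec (s : List Int) (lo : Int) (hlo : 0 ≤ lo) :
    ∀ (n : Nat), 1 ≤ n → lo.toNat + n ≤ s.length →
    ∃ (M : Int) (m : Nat),
      PySem.List.max? ((s.drop lo.toNat).take n) (fun y => y) = some M ∧
      PySem.List.index? ((s.drop lo.toNat).take n) M = some m ∧
      (PySem.List.pyRange (lo + 1) (lo + (n : Int)) 1).foldl
        (fun bi i => if PySem.List.pyGetD s i 0 > PySem.List.pyGetD s bi 0 then i else bi) lo
        = lo + (m : Int) := by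
  intro n hn
  induction n, hn using Nat.le_induction with
  | base =>
    intro hlen
    have hlt : lo.toNat < s.length := by omega
    have hd : (s.drop lo.toNat).take 1 = [s[lo.toNat]] := by
      rw [List.drop_eq_getElem_cons hlt]; rfl
    refine ⟨s[lo.toNat], 0, ?_, ?_, ?_⟩
    · rw [hd, PySem.List.max?_id_cons]; rfl
    · rw [hd]; exact PySem.List.index?_cons_self _ _
    · rw [PySem.List.pyRange_one_eq_nil (by omega)]; simp
  | succ n hn ih =>
    intro hlen
    obtain ⟨M, m, hmax, hidx, hfold⟩ := ih (by omega)
    set t := (s.drop lo.toNat).take n with ht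
    have htlen : t.length = n := by
      rw [ht]; simp [List.length_take, List.length_drop]; omega
    have hxlt : lo.toNat + n < s.length := by omega
    have hx : (s.drop lo.toNat).take (n + 1) = t ++ [s[lo.toNat + n]] := by
      rw [List.take_succ, ht]
      congr 1
      rw [List.getElem?_drop, List.getElem?_eq_getElem hxlt]
      rfl
    obtain ⟨t0, tr, htt⟩ := List.exists_cons_of_ne_nil (by
      intro h; rw [h] at htlen; simp at htlen; omega : t ≠ [])
    have hM : tr.foldl max t0 = M := by
      rw [htt, PySem.List.max?_id_cons] at hmax
      exact Option.some.inj hmax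
    have hmax' : PySem.List.max? (t ++ [s[lo.toNat + n]]) (fun y => y)
        = some (max M (s[lo.toNat + n])) := by
      rw [htt, List.cons_append, PySem.List.max?_id_cons, List.foldl_append]
      simp [hM]
    obtain ⟨hmlt, htm, -⟩ := PySem.List.getElem_of_index?_eq_some hidx
    have hrange : PySem.List.pyRange (lo + 1) (lo + ((n : Int) + 1)) 1
        = PySem.List.pyRange (lo + 1) (lo + (n : Int)) 1 ++ [lo + (n : Int)] := by
      have h := PySem.List.pyRange_one_succ_right (a := lo + 1) (b := lo + (n : Int)) (by omega)
      rw [show lo + ((n : Int) + 1) = lo + (n : Int) + 1 from by ring]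
      exact h
    have hgx : PySem.List.pyGetD s (lo + (n : Int)) 0 = s[lo.toNat + n] := by
      have hc : lo + (n : Int) = ((lo.toNat + n : Nat) : Int) := by
        push_cast [Int.toNat_of_nonneg hlo]; ring
      rw [hc, PySem.List.pyGetD_natCast, List.getD_eq_getElem?_getD,
        List.getElem?_eq_getElem hxlt]; rfl
    have hgm : PySem.List.pyGetD s (lo + (m : Int)) 0 = M := by
      have hmn : lo.toNat + m < s.length := by omega
      have hc : lo + (m : Int) = ((lo.toNat + m : Nat) : Int) := by
        push_cast [Int.toNat_of_nonneg hlo]; ring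
      rw [hc, PySem.List.pyGetD_natCast, List.getD_eq_getElem?_getD,
        List.getElem?_eq_getElem hmn]
      simp only [Option.getD_some]
      have h2 : s[lo.toNat + m] = t[m]'hmlt := by
        simp [ht, List.getElem_take, List.getElem_drop]
      exact h2.trans htm
    have hcast : ((n + 1 : Nat) : Int) = (n : Int) + 1 := by push_cast; ring
    by_cases hcmp : s[lo.toNat + n] > M
    · refine ⟨s[lo.toNat + n], n, ?_, ?_, ?_⟩
      · rw [hx, hmax', max_eq_right hcmp.le]
      · have hnot : s[lo.toNat + n] ∉ t := by
          intro hmem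
          exact absurd (PySem.List.max?_isMax hmax _ hmem) (by simpa using hcmp)
        rw [hx, PySem.List.index?_append_singleton_self t _ hnot, htlen]
      · rw [hcast, hrange, List.foldl_append, hfold]
        simp only [List.foldl]
        rw [hgx, hgm, if_pos hcmp]
    · refine ⟨M, m, ?_, ?_, ?_⟩
      · rw [hx, hmax', max_eq_left (not_lt.mp hcmp)]
      · rw [hx, PySem.List.index?_append_of_mem _ (PySem.List.max?_mem hmax), hidx]
      · rw [hcast, hrange, List.foldl_append, hfold]
        simp only [List.foldl]
        rw [hgx, hgm, if_neg hcmp]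

-- A on the slice [lo, hi) of s equals the index recursion pvGo on it
theorem pvGo_eq (n : Nat) : ∀ (s : List Int) (lo hi : Int), 0 ≤ lo → lo < hi →
    hi ≤ (s.length : Int) → (hi - lo).toNat = n →
    calcMaxProfit ((s.drop lo.toNat).take n) = pvGo s lo hi := by
  induction n using Nat.strong_induction_on with
  | _ n IH =>
    intro s lo hi hlo hlt hle hn
    have hhi : hi = lo + (n : Int) := by omega
    have hn1 : 1 ≤ n := by omega
    have hlen : lo.toNat + n ≤ s.length := by omega
    obtain ⟨M, m, hmax, hidx, hfold⟩ := pvArgmaxSpec s lo hlo n hn1 hlen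
    set t := (s.drop lo.toNat).take n with ht
    have htlen : t.length = n := by
      rw [ht]; simp [List.length_take, List.length_drop]; omega
    obtain ⟨hmlt, htm, -⟩ := PySem.List.getElem_of_index?_eq_some hidx
    have hmn : m < n := htlen ▸ hmlt
    have hgm : PySem.List.pyGetD s (lo + (m : Int)) 0 = M := by
      have hmn' : lo.toNat + m < s.length := by omega
      have hc : lo + (m : Int) = ((lo.toNat + m : Nat) : Int) := by
        push_cast [Int.toNat_of_nonneg hlo]; ring
      rw [hc, PySem.List.pyGetD_natCast, List.getD_eq_getElem?_getD,
        List.getElem?_eq_getElem hmn']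
      simp only [Option.getD_some]
      have h2 : s[lo.toNat + m] = t[m]'hmlt := by
        simp [ht, List.getElem_take, List.getElem_drop]
      exact h2.trans htm
    have hgtm : PySem.List.pyGetD t (m : Int) 0 = M := by
      rw [PySem.List.pyGetD_natCast, List.getD_eq_getElem?_getD,
        List.getElem?_eq_getElem hmlt]
      simpa using htm
    have hright : PySem.List.slice t (some ((m : Int) + 2)) none
        = (s.drop (lo + (m : Int) + 2).toNat).take (lo + (n : Int) - (lo + (m : Int) + 2)).toNat := by
      have hc : ((m : Int) + 2) = ((m + 2 : Nat) : Int) := by push_cast; ring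
      rw [hc, PySem.List.slice_from_natCast, ht, List.drop_take, List.drop_drop,
        show (lo + (m : Int) + 2).toNat = lo.toNat + (m + 2) from by omega,
        show (lo + (n : Int) - (lo + (m : Int) + 2)).toNat = n - (m + 2) from by omega]
    have hleft : 2 ≤ m → PySem.List.slice t none (some ((m : Int) - 1))
        = (s.drop lo.toNat).take (lo + (m : Int) - 1 - lo).toNat := by
      intro hm2
      have hc : ((m : Int) - 1) = ((m - 1 : Nat) : Int) := by omega
      rw [hc, PySem.List.slice_to_natCast, ht, List.take_take,
        show (lo + (m : Int) - 1 - lo).toNat = m - 1 from by omega,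
        show min (m - 1) n = m - 1 from by omega]
    rw [calcMaxProfit]
    by_cases hone : n = 1
    · rw [if_pos (by rw [htlen, hone]; rfl)]
      have hm0 : m = 0 := by omega
      subst hm0
      rw [pvGo, hhi]
      simp only [hfold]
      rw [dif_neg (by omega), dif_neg (by omega)]
      simp only [Nat.cast_zero] at hgtm hgm ⊢
      rw [hgtm, hgm]
    · rw [if_neg (by rw [htlen]; exact_mod_cast (by omega : ¬ (n : Int) = 1))]
      split
      next heq => rw [hmax] at heq; cases heq
      next mx heq =>
        rw [hmax] at heq
        obtain rfl : mx = M := (Option.some.inj heq).symm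
        split
        next heq2 => rw [hidx] at heq2; cases heq2
        next mi heq2 =>
          rw [hidx] at heq2
          have hmieq : m = mi := Option.some.inj heq2
          subst hmieq
          rw [pvGo, hhi]
          simp only [hfold]
          rw [htlen]
          by_cases h1 : (m : Int) ≤ 1
          · rw [if_pos h1]
            by_cases h2 : (m : Int) + 2 ≥ (n : Int)
            · rw [if_pos h2, dif_neg (by omega), dif_neg (by omega), hgm, hgtm]
            · rw [if_neg h2, dif_neg (by omega), dif_pos (by omega), hgm, hgtm, hright,
                IH (lo + (n : Int) - (lo + (m : Int) + 2)).toNat (by omega) s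
                  (lo + (m : Int) + 2) (lo + (n : Int)) (by omega) (by omega) (by omega) rfl]
          · have hm2 : 2 ≤ m := by omega
            rw [if_neg h1]
            by_cases h3 : (m : Int) ≥ (n : Int) - 2
            · rw [if_pos h3, if_neg (by omega), dif_pos (by omega), dif_neg (by omega),
                hgm, hgtm, hleft hm2,
                IH (lo + (m : Int) - 1 - lo).toNat (by omega) s
                  lo (lo + (m : Int) - 1) (by omega) (by omega) (by omega) rfl]
            · rw [if_neg h3, dif_pos (by omega), dif_pos (by omega), hgm, hgtm, hright,
                hleft hm2,
                IH (lo + (n : Int) - (lo + (m : Int) + 2)).toNat (by omega) s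
                  (lo + (m : Int) + 2) (lo + (n : Int)) (by omega) (by omega) (by omega) rfl,
                IH (lo + (m : Int) - 1 - lo).toNat (by omega) s
                  lo (lo + (m : Int) - 1) (by omega) (by omega) (by omega) rfl]

-- ---------- abstract form of B's marking loop ----------

def pvUpd (R : Int → Bool) (i : Int) : Int → Bool :=
  fun j => if j = i - 1 ∨ j = i ∨ j = i + 1 then true else R j

def pvProc (s : List Int) : List Int → (Int → Bool) → Int
  | [], _ => 0
  | i :: rest, R =>
      if R i then pvProc s rest R
      else PySem.List.pyGetD s i 0 + pvProc s rest (pvUpd R i)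

-- strict processing order of Source B: larger value first, ties by smaller index
def pvOrd (s : List Int) (a b : Int) : Prop :=
  PySem.List.pyGetD s b 0 < PySem.List.pyGetD s a 0 ∨
    (PySem.List.pyGetD s a 0 = PySem.List.pyGetD s b 0 ∧ a < b)

-- sorted2 with Int keys is sorted with the lexicographic key
theorem pvBeforeEq (k1 k2 : Int → Int) (a b : Int) :
    (decide (k1 a < k1 b) || (!decide (k1 b < k1 a) && decide (k2 a < k2 b)))
      = decide (toLex (k1 a, k2 a) < toLex (k1 b, k2 b)) := by
  by_cases h1 : k1 a < k1 b <;> by_cases h2 : k1 b < k1 a <;> by_cases h3 : k2 a < k2 b <;>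
    simp [Prod.Lex.lt_iff, h1, h2, h3] <;> omega

theorem pvSorted2Lex (xs : List Int) (k1 k2 : Int → Int) :
    PySem.List.sorted2 xs k1 k2 = PySem.List.sorted xs (fun x => toLex (k1 x, k2 x)) := by
  rw [PySem.List.sorted_eq_foldl_insertBy]
  show List.foldl _ [] xs = List.foldl _ [] xs
  congr 1
  funext acc x
  congr 1
  funext a b
  exact pvBeforeEq k1 k2 a b

-- an argmax fold stays put when nothing beats the seed
theorem pvFoldStay (s : List Int) (l : List Int) (b : Int)
    (h : ∀ j ∈ l, ¬ (PySem.List.pyGetD s b 0 < PySem.List.pyGetD s j 0)) :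
    l.foldl (fun bi i => if PySem.List.pyGetD s i 0 > PySem.List.pyGetD s bi 0 then i else bi) b
      = b := by
  induction l with
  | nil => rfl
  | cons x xs ih =>
    simp only [List.foldl_cons]
    rw [if_neg (h x (List.mem_cons_self ..)), ih (fun j hj => h j (List.mem_cons_of_mem _ hj))]

-- when i is the strict first-argmax of [lo, hi), pvGo picks it and splits there
theorem pvGoPick (s : List Int) (lo hi i : Int) (hlo : lo ≤ i) (hhi : i < hi)
    (h : ∀ j, lo ≤ j → j < hi → j ≠ i →
      (PySem.List.pyGetD s j 0 < PySem.List.pyGetD s i 0 ∨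
        (PySem.List.pyGetD s j 0 = PySem.List.pyGetD s i 0 ∧ i < j))) :
    pvGo s lo hi = PySem.List.pyGetD s i 0
      + (if i + 2 < hi then pvGo s (i + 2) hi else 0)
      + (if lo < i - 1 then pvGo s lo (i - 1) else 0) := by
  have hfold : (PySem.List.pyRange (lo + 1) hi 1).foldl
      (fun bi j => if PySem.List.pyGetD s j 0 > PySem.List.pyGetD s bi 0 then j else bi) lo
      = i := by
    rw [PySem.List.pyRange_one_append (lo + 1) (i + 1) hi (by omega) (by omega),
      List.foldl_append]
    have h1 : (PySem.List.pyRange (lo + 1) (i + 1)).foldl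
        (fun bi j => if PySem.List.pyGetD s j 0 > PySem.List.pyGetD s bi 0 then j else bi) lo
        = i := by
      rcases eq_or_lt_of_le hlo with heq | hlt
      · rw [← heq, PySem.List.pyRange_one_eq_nil (by omega)]; rfl
      · rw [PySem.List.pyRange_one_succ_right (by omega : lo + 1 ≤ i), List.foldl_append]
        set b0 := (PySem.List.pyRange (lo + 1) i).foldl
          (fun bi j => if PySem.List.pyGetD s j 0 > PySem.List.pyGetD s bi 0 then j else bi) lo
          with hb0
        have hbm := pvFoldChoiceMem (PySem.List.pyRange (lo + 1) i) lo
          (fun bi j => decide (PySem.List.pyGetD s j 0 > PySem.List.pyGetD s bi 0))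
        have hbr : b0 = lo ∨ b0 ∈ PySem.List.pyRange (lo + 1) i := by
          simpa [hb0] using hbm
        have hblt : lo ≤ b0 ∧ b0 < i := by
          rcases hbr with h' | h'
          · omega
          · rw [PySem.List.mem_pyRange_one] at h'; omega
        have hcond : PySem.List.pyGetD s b0 0 < PySem.List.pyGetD s i 0 := by
          rcases h b0 hblt.1 (by omega) (by omega) with h' | h'
          · exact h'
          · omega
        simp only [List.foldl_cons, List.foldl_nil]
        rw [if_pos hcond]
    rw [h1]
    apply pvFoldStay
    intro j hj
    rw [PySem.List.mem_pyRange_one] at hj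
    rcases h j (by omega) (by omega) (by omega) with h' | h' <;> omega
  rw [pvGo]
  simp only [hfold]
  by_cases hr : i + 2 < hi <;> by_cases hl : lo < i - 1
  · rw [dif_pos hr, dif_pos (by omega : i - 1 > lo), if_pos hr, if_pos hl]
    try ring
  · rw [dif_pos hr, dif_neg (by omega : ¬ i - 1 > lo), if_pos hr, if_neg hl]
    try ring
  · rw [dif_neg hr, dif_pos (by omega : i - 1 > lo), if_neg hr, if_pos hl]
    try ring
  · rw [dif_neg hr, dif_neg (by omega : ¬ i - 1 > lo), if_neg hr, if_neg hl]
    try ring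

-- getD after a set, pointwise
theorem pvGetDSet (l : List Bool) (k j : Nat) :
    (l.set k true).getD j false = if k = j ∧ k < l.length then true else l.getD j false := by
  rw [List.getD_eq_getElem?_getD, List.getElem?_set]
  by_cases h1 : k = j
  · subst h1
    by_cases h2 : k < l.length
    · simp [h2]
    · rw [List.getD_eq_getElem?_getD, List.getElem?_eq_none (by omega : l.length ≤ k)]
      simp [h2]
  · simp [h1, List.getD_eq_getElem?_getD]

-- the concrete fold of port B equals the abstract marking process
theorem pvBridge (s : List Int) (os : List Int) :
    ∀ (l : List Bool) (t : Int) (R : Int → Bool),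
    l.length = s.length →
    (∀ i ∈ os, 0 ≤ i ∧ i < (s.length : Int)) →
    (∀ j : Int, 0 ≤ j → j < (s.length : Int) → R j = l.getD j.toNat false) →
    (os.foldl (pvStep s) (l, t)).2 = t + pvProc s os R := by
  induction os with
  | nil => intro l t R _ _ _; simp [pvProc]
  | cons i rest ih =>
    intro l t R hlen hmem hag
    obtain ⟨hi0, hin⟩ := hmem i (List.mem_cons_self ..)
    have hq : PySem.List.pyGetD l i false = R i := by
      rw [PySem.List.pyGetD_of_nonneg _ _ hi0, hag i hi0 hin]
    simp only [List.foldl_cons, pvStep, hq, pvProc]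
    by_cases hR : R i = true
    · rw [hR]
      simp only [if_true]
      exact ih l t R hlen (fun j hj => hmem j (List.mem_cons_of_mem _ hj)) hag
    · have hRf : R i = false := by simpa using hR
      rw [hRf]
      simp only [Bool.false_eq_true, if_false]
      set l1 := l.set i.toNat true with hl1
      set l2 := if 0 < i then l1.set (i - 1).toNat true else l1 with hl2
      set l3 := if i + 1 < (s.length : Int) then l2.set (i + 1).toNat true else l2 with hl3
      have hlen1 : l1.length = s.length := by simp [hl1, hlen]
      have hlen2 : l2.length = s.length := by
        rw [hl2]; split <;> simp [hlen1]
      have hlen3 : l3.length = s.length := by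
        rw [hl3]; split <;> simp [hlen2]
      have hag' : ∀ j : Int, 0 ≤ j → j < (s.length : Int) →
          pvUpd R i j = l3.getD j.toNat false := by
        intro j hj0 hjn
        have hg1 : l1.getD j.toNat false
            = if i.toNat = j.toNat then true else l.getD j.toNat false := by
          rw [hl1, pvGetDSet]
          split_ifs with h1 h2 h2 <;> first | rfl | omega
        have hg2 : l2.getD j.toNat false
            = if 0 < i ∧ (i - 1).toNat = j.toNat then true else l1.getD j.toNat false := by
          rw [hl2]; split_ifs with h1 h2 h2
          · rw [pvGetDSet, if_pos ⟨h2.2, by omega⟩]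
          · rw [pvGetDSet, if_neg (by omega)]
          · omega
          · rfl
        have hg3 : l3.getD j.toNat false
            = if i + 1 < (s.length : Int) ∧ (i + 1).toNat = j.toNat then true
              else l2.getD j.toNat false := by
          rw [hl3]; split_ifs with h1 h2 h2
          · rw [pvGetDSet, if_pos ⟨h2.2, by omega⟩]
          · rw [pvGetDSet, if_neg (by omega)]
          · omega
          · rfl
        rw [hg3, hg2, hg1]
        unfold pvUpd
        split_ifs <;> first | rfl | (exact hag j hj0 hjn) | omega
      rw [ih l3 (t + PySem.List.pyGetD s i 0) (pvUpd R i) hlen3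
        (fun j hj => hmem j (List.mem_cons_of_mem _ hj)) hag']
      ring

-- main invariant: processing the remaining sorted indices from a state whose alive
-- positions form the maximal segments `segs` yields the pvGo-sum of those segments
theorem pvMain (s : List Int) (os : List Int) :
    ∀ (R : Int → Bool) (segs : List (Int × Int)),
    (∀ j : Int, 0 ≤ j → j < (s.length : Int) →
      (R j = false ↔ ∃ p ∈ segs, p.1 ≤ j ∧ j < p.2)) →
    (∀ p ∈ segs, 0 ≤ p.1 ∧ p.1 < p.2 ∧ p.2 ≤ (s.length : Int) ∧
      (p.1 = 0 ∨ R (p.1 - 1) = true) ∧ (p.2 = (s.length : Int) ∨ R p.2 = true)) →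
    segs.Pairwise (fun p q => p.2 ≤ q.1 ∨ q.2 ≤ p.1) →
    (∀ j : Int, 0 ≤ j → j < (s.length : Int) → R j = false → j ∈ os) →
    (∀ i ∈ os, 0 ≤ i ∧ i < (s.length : Int)) →
    os.Pairwise (pvOrd s) →
    os.Nodup →
    pvProc s os R = (segs.map (fun p => pvGo s p.1 p.2)).sum := by
  induction os with
  | nil =>
    intro R segs hcov hseg hsep halive hbnd hpw hnd
    cases segs with
    | nil => rfl
    | cons p ps =>
      exfalso
      have hp := hseg p (List.mem_cons_self ..)
      have halv : R p.1 = false := by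
        rw [hcov p.1 hp.1 (by omega)]
        exact ⟨p, List.mem_cons_self .., le_refl _, hp.2.1⟩
      exact absurd (halive p.1 hp.1 (by omega) halv) (List.not_mem_nil)
  | cons i rest ih =>
    intro R segs hcov hseg hsep halive hbnd hpw hnd
    obtain ⟨hi0, hin⟩ := hbnd i (List.mem_cons_self ..)
    by_cases hR : R i = true
    · rw [pvProc, if_pos hR]
      exact ih R segs hcov hseg hsep
        (fun j hj0 hjn hjf => by
          rcases List.mem_cons.mp (halive j hj0 hjn hjf) with rfl | h
          · rw [hR] at hjf; cases hjf
          · exact h)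
        (fun j hj => hbnd j (List.mem_cons_of_mem _ hj))
        (List.Pairwise.sublist (List.sublist_cons_self _ _) hpw)
        (List.Nodup.of_cons hnd)
    · have hRf : R i = false := by simpa using hR
      obtain ⟨p, hpmem, hplo, hphi⟩ := (hcov i hi0 hin).mp hRf
      obtain ⟨lo, hi'⟩ := p
      simp only at hplo hphi
      obtain ⟨u, v, rfl⟩ := List.append_of_mem hpmem
      obtain ⟨hlo0, hlohi, hhin, hbl, hbr⟩ := hseg (lo, hi') hpmem
      simp only at hlo0 hlohi hhin hbl hbr
      -- separation of other segments from (lo, hi')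
      have hsepu : ∀ q ∈ u, q.2 ≤ lo ∨ hi' ≤ q.1 := by
        intro q hq
        have := (List.pairwise_append.mp hsep).2.2 q hq (lo, hi') (List.mem_cons_self ..)
        simpa using this
      have hsepv : ∀ q ∈ v, hi' ≤ q.1 ∨ q.2 ≤ lo := by
        intro q hq
        have := List.Pairwise.of_cons (List.pairwise_append.mp hsep).2.1
        have h' := (List.rel_of_pairwise_cons (List.pairwise_append.mp hsep).2.1) hq
        simpa using h'
      -- every position of the segment is alive
      have halvseg : ∀ j, lo ≤ j → j < hi' → R j = false := by
        intro j h1 h2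
        rw [hcov j (by omega) (by omega)]
        exact ⟨(lo, hi'), hpmem, h1, h2⟩
      -- i is the strict first-argmax of its segment
      have hOrd : ∀ j ∈ rest, pvOrd s i j := fun j hj => List.rel_of_pairwise_cons hpw hj
      have hIarg : ∀ j, lo ≤ j → j < hi' → j ≠ i →
          (PySem.List.pyGetD s j 0 < PySem.List.pyGetD s i 0 ∨
            (PySem.List.pyGetD s j 0 = PySem.List.pyGetD s i 0 ∧ i < j)) := by
        intro j h1 h2 hne
        have hjm : j ∈ i :: rest := halive j (by omega) (by omega) (halvseg j h1 h2)
        rcases List.mem_cons.mp hjm with rfl | hjr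
        · exact absurd rfl hne
        · rcases hOrd j hjr with h' | h'
          · exact Or.inl h'
          · exact Or.inr ⟨h'.1.symm, h'.2⟩
      set R' := pvUpd R i with hR'
      have hR'true : ∀ j, R j = true → R' j = true := by
        intro j hj
        rw [hR']; unfold pvUpd; split_ifs <;> simp [hj]
      have hR'val : ∀ j : Int, R' j = false ↔ (R j = false ∧ ¬(j = i - 1 ∨ j = i ∨ j = i + 1)) := by
        intro j
        rw [hR']; unfold pvUpd; split_ifs with h <;> simp [h]
      set newsegs : List (Int × Int) :=
        (if lo < i - 1 then [(lo, i - 1)] else []) ++ (if i + 2 < hi' then [(i + 2, hi')] else [])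
        with hns
      set segs' := u ++ (newsegs ++ v) with hsegs'
      -- boundary positions around the segment are not alive in R
      have hnotalive : ∀ j : Int, 0 ≤ j → j < (s.length : Int) → R j = false →
          (lo ≤ j ∧ j < hi') ∨ ((j < lo - 1 ∨ hi' < j) ∨ (j = lo - 1 ∧ R (lo-1) = false) ∨ (j = hi' ∧ R hi' = false)) := by
        intro j h0 hn hf
        by_cases h1 : lo ≤ j ∧ j < hi'
        · exact Or.inl h1
        · right
          by_cases h2 : j = lo - 1
          · exact Or.inr (Or.inl ⟨h2, h2 ▸ hf⟩)
          · by_cases h3 : j = hi'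
            · exact Or.inr (Or.inr ⟨h3, h3 ▸ hf⟩)
            · exact Or.inl (by omega)
      have hmemnew : ∀ q ∈ newsegs,
          (q = (lo, i - 1) ∧ lo < i - 1) ∨ (q = (i + 2, hi') ∧ i + 2 < hi') := by
        intro q hq
        rw [hns, List.mem_append] at hq
        rcases hq with hq | hq
        · left
          constructor
          · revert hq; split_ifs with h <;> intro hq
            · simpa using hq
            · simp at hq
          · revert hq; split_ifs with h <;> intro hq
            · exact h
            · simp at hq
        · right
          constructor
          · revert hq; split_ifs with h <;> intro hq
            · simpa using hq
            · simp at hq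
          · revert hq; split_ifs with h <;> intro hq
            · exact h
            · simp at hq
      -- coverage for the new state
      have hcov' : ∀ j : Int, 0 ≤ j → j < (s.length : Int) →
          (R' j = false ↔ ∃ p ∈ segs', p.1 ≤ j ∧ j < p.2) := by
        intro j hj0 hjn
        rw [hR'val]
        constructor
        · rintro ⟨hjf, hjni⟩
          obtain ⟨q, hqm, hq1, hq2⟩ := (hcov j hj0 hjn).mp hjf
          rw [List.mem_append, List.mem_cons] at hqm
          rcases hqm with hqu | hql | hqv
          · exact ⟨q, by simp [hsegs', hqu], hq1, hq2⟩
          · -- j in the split segment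
            rw [hql] at hq1 hq2
            simp only at hq1 hq2
            by_cases hjl : j < i - 1
            · refine ⟨(lo, i - 1), ?_, hq1, hjl⟩
              rw [hsegs', hns]
              simp [if_pos (show lo < i - 1 by omega)]
            · have hjr : i + 2 ≤ j := by omega
              refine ⟨(i + 2, hi'), ?_, hjr, hq2⟩
              rw [hsegs', hns]
              simp [if_pos (show i + 2 < hi' by omega)]
          · exact ⟨q, by simp [hsegs', hqv], hq1, hq2⟩
        · rintro ⟨q, hqm, hq1, hq2⟩
          rw [hsegs', List.mem_append, List.mem_append] at hqm
          rcases hqm with hqu | hqn | hqv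
          · have hRj : R j = false := by
              rw [hcov j hj0 hjn]
              exact ⟨q, by simp [hqu], hq1, hq2⟩
            refine ⟨hRj, ?_⟩
            have hd := hsepu q hqu
            intro hc
            -- j ∈ q, and q is separated from [lo, hi'); i-1, i, i+1 each lie in
            -- [lo-1, hi'], with the ends removed in R
            rcases hc with rfl | rfl | rfl
            · -- j = i - 1: if i = lo then j = lo - 1, removed since lo boundary
              by_cases hil : i = lo
              · rcases hbl with h0 | hrem
                · omega
                · rw [hil] at hRj; rw [hRj] at hrem; cases hrem
              · omega
            · omega
            · by_cases hir : i + 1 = hi'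
              · rcases hbr with h0 | hrem
                · omega
                · rw [hir] at hRj; rw [hRj] at hrem; cases hrem
              · omega
          · rcases hmemnew q hqn with ⟨rfl, hlt⟩ | ⟨rfl, hlt⟩
            · simp only at hq1 hq2
              exact ⟨halvseg j hq1 (by omega), by omega⟩
            · simp only at hq1 hq2
              exact ⟨halvseg j (by omega) hq2, by omega⟩
          · have hRj : R j = false := by
              rw [hcov j hj0 hjn]
              exact ⟨q, by simp [hqv], hq1, hq2⟩
            refine ⟨hRj, ?_⟩
            have hd := hsepv q hqv
            intro hc
            rcases hc with rfl | rfl | rfl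
            · by_cases hil : i = lo
              · rcases hbl with h0 | hrem
                · omega
                · rw [hil] at hRj; rw [hRj] at hrem; cases hrem
              · omega
            · omega
            · by_cases hir : i + 1 = hi'
              · rcases hbr with h0 | hrem
                · omega
                · rw [hir] at hRj; rw [hRj] at hrem; cases hrem
              · omega
      -- segment well-formedness for the new state
      have hseg' : ∀ p ∈ segs', 0 ≤ p.1 ∧ p.1 < p.2 ∧ p.2 ≤ (s.length : Int) ∧
          (p.1 = 0 ∨ R' (p.1 - 1) = true) ∧ (p.2 = (s.length : Int) ∨ R' p.2 = true) := by
        intro q hqm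
        rw [hsegs', List.mem_append, List.mem_append] at hqm
        rcases hqm with hqu | hqn | hqv
        · obtain ⟨a1, a2, a3, a4, a5⟩ := hseg q (by simp [hqu])
          exact ⟨a1, a2, a3,
            by rcases a4 with h | h; exact Or.inl h; exact Or.inr (hR'true _ h),
            by rcases a5 with h | h; exact Or.inl h; exact Or.inr (hR'true _ h)⟩
        · rcases hmemnew q hqn with ⟨rfl, hlt⟩ | ⟨rfl, hlt⟩
          · refine ⟨by omega, by omega, by omega, ?_, ?_⟩
            · rcases hbl with h | h
              · exact Or.inl h
              · exact Or.inr (hR'true _ h)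
            · right
              rw [hR']; unfold pvUpd
              rw [if_pos (by omega)]
          · refine ⟨by omega, by omega, by omega, ?_, ?_⟩
            · right
              rw [hR']; unfold pvUpd
              rw [if_pos (by omega)]
            · rcases hbr with h | h
              · exact Or.inl h
              · exact Or.inr (hR'true _ h)
        · obtain ⟨a1, a2, a3, a4, a5⟩ := hseg q (by simp [hqv])
          exact ⟨a1, a2, a3,
            by rcases a4 with h | h; exact Or.inl h; exact Or.inr (hR'true _ h),
            by rcases a5 with h | h; exact Or.inl h; exact Or.inr (hR'true _ h)⟩
      -- separation for the new state
      have hnewbnd : ∀ q ∈ newsegs, lo ≤ q.1 ∧ q.2 ≤ hi' := by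
        intro q hq
        rcases hmemnew q hq with ⟨rfl, hlt⟩ | ⟨rfl, hlt⟩
        · refine ⟨le_refl _, ?_⟩
          show i - 1 ≤ hi'
          omega
        · refine ⟨?_, le_refl _⟩
          show lo ≤ i + 2
          omega
      have hsep' : segs'.Pairwise (fun p q => p.2 ≤ q.1 ∨ q.2 ≤ p.1) := by
        obtain ⟨hu, hcv, huc⟩ := List.pairwise_append.mp hsep
        have hv := List.Pairwise.of_cons hcv
        rw [hsegs', List.pairwise_append]
        refine ⟨hu, ?_, ?_⟩
        · rw [List.pairwise_append]
          refine ⟨?_, hv, ?_⟩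
          · -- pairwise within newsegs
            rw [hns]
            split_ifs with h1 h2 h2 <;> simp <;> omega
          · intro a ha b hb
            have hab := hnewbnd a ha
            have hbb := hsepv b hb
            rcases hbb with h | h
            · exact Or.inl (by omega)
            · exact Or.inr (by omega)
        · intro a ha b hb
          rw [List.mem_append] at hb
          have hau := hsepu a ha
          rcases hb with hbn | hbv
          · have hbb := hnewbnd b hbn
            rcases hau with h | h
            · exact Or.inl (by omega)
            · exact Or.inr (by omega)
          · exact huc a ha b (List.mem_cons_of_mem _ hbv)
      -- alive positions of the new state are all in rest
      have halive' : ∀ j : Int, 0 ≤ j → j < (s.length : Int) → R' j = false → j ∈ rest := by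
        intro j hj0 hjn hjf
        obtain ⟨hjf', hjni⟩ := (hR'val j).mp hjf
        rcases List.mem_cons.mp (halive j hj0 hjn hjf') with rfl | h
        · exact absurd (Or.inr (Or.inl rfl)) hjni
        · exact h
      have hIH := ih R' segs' hcov' hseg' hsep' halive'
        (fun j hj => hbnd j (List.mem_cons_of_mem _ hj))
        (List.Pairwise.sublist (List.sublist_cons_self _ _) hpw)
        (List.Nodup.of_cons hnd)
      rw [pvProc, if_neg hR, hIH]
      -- arithmetic: sum over segs' + value = sum over segs
      have hpick := pvGoPick s lo hi' i hplo hphi hIarg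
      rw [hsegs', hns]
      simp only [List.map_append, List.sum_append]
      have hnsum : ((if lo < i - 1 then [(lo, i - 1)] else []).map
            (fun p => pvGo s p.1 p.2)).sum
          + ((if i + 2 < hi' then [(i + 2, hi')] else []).map
            (fun p => pvGo s p.1 p.2)).sum
          = (if lo < i - 1 then pvGo s lo (i - 1) else 0)
            + (if i + 2 < hi' then pvGo s (i + 2) hi' else 0) := by
        split_ifs <;> simp
      simp only [List.map_cons, List.sum_cons]
      rw [hpick] at *
      omega
  -- end pvMain

-- order properties of Source B's sort
theorem pvOrderPairwise (s : List Int) :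
    (PySem.List.sorted2 (PySem.List.pyRange 0 (s.length : Int))
      (fun i => -(PySem.List.pyGetD s i 0)) (fun i => i)).Pairwise (pvOrd s) := by
  rw [pvSorted2Lex]
  have hpw := PySem.List.sorted_pairwise (PySem.List.pyRange 0 (s.length : Int))
    (fun i => toLex (-(PySem.List.pyGetD s i 0), i))
  have hnd : (PySem.List.sorted (PySem.List.pyRange 0 (s.length : Int))
      (fun i => toLex (-(PySem.List.pyGetD s i 0), i))).Nodup :=
    (PySem.List.sorted_perm _ _ _).symm.nodup (PySem.List.nodup_pyRange_one _ _)
  have hboth := hpw.and hnd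
  refine hboth.imp ?_
  intro a b hab
  obtain ⟨hle, hne⟩ := hab
  rw [Prod.Lex.le_iff] at hle
  simp only [ofLex_toLex] at hle
  unfold pvOrd
  rcases hle with h | h
  · exact Or.inl (by omega)
  · exact Or.inr ⟨by omega, by omega⟩

theorem pvOrderNodup (s : List Int) :
    (PySem.List.sorted2 (PySem.List.pyRange 0 (s.length : Int))
      (fun i => -(PySem.List.pyGetD s i 0)) (fun i => i)).Nodup :=
  (PySem.List.sorted2_perm _ _ _ _).symm.nodup (PySem.List.nodup_pyRange_one _ _)

theorem pvOrderMem (s : List Int) (i : Int) :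
    i ∈ PySem.List.sorted2 (PySem.List.pyRange 0 (s.length : Int))
      (fun j => -(PySem.List.pyGetD s j 0)) (fun j => j)
      ↔ 0 ≤ i ∧ i < (s.length : Int) := by
  rw [(PySem.List.sorted2_perm _ _ _ _).mem_iff, PySem.List.mem_pyRange_one]

-- ===== VERDICT (by name: the statement is the Claim_ definition above) =====
theorem calcMaxProfit_spec : Claim_equal_calcMaxProfit := by
  intro s _hdom hpre
  unfold Spec_calcMaxProfit calcMaxProfit_alt
  have hlen : 1 ≤ s.length := by
    cases s with
    | nil => exact absurd rfl hpre
    | cons a l => simp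
  set order := PySem.List.sorted2 (PySem.List.pyRange 0 (s.length : Int))
    (fun i => -(PySem.List.pyGetD s i 0)) (fun i => i) with horder
  have hbridge := pvBridge s order (List.replicate s.length false) 0 (fun _ => false)
    (by simp)
    (fun i hi => (pvOrderMem s i).mp hi)
    (fun j hj0 hjn => by
      rw [List.getD_replicate]
      omega)
  rw [hbridge, zero_add]
  have hmain := pvMain s order (fun _ => false) [(0, (s.length : Int))]
    (fun j hj0 hjn => by
      constructor
      · intro _; exact ⟨(0, (s.length : Int)), List.mem_cons_self .., hj0, hjn⟩
      · intro _; rfl)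
    (fun p hp => by
      rcases List.mem_cons.mp hp with rfl | h
      · refine ⟨le_refl _, ?_, le_refl _, Or.inl rfl, Or.inl rfl⟩
        show (0 : Int) < (s.length : Int)
        exact_mod_cast hlen
      · cases h)
    (List.pairwise_singleton _ _)
    (fun j hj0 hjn _ => (pvOrderMem s j).mpr ⟨hj0, hjn⟩)
    (fun i hi => (pvOrderMem s i).mp hi)
    (pvOrderPairwise s)
    (pvOrderNodup s)
  rw [hmain]
  simp only [List.map_cons, List.map_nil, List.sum_cons, List.sum_nil, add_zero]
  have hA := pvGo_eq s.length s 0 (s.length : Int) le_rfl (by exact_mod_cast hlen)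
    le_rfl (by omega)
  simpa using hA
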